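-- pv_equiv track=rewrite | github.com/jfsicilia/kanata | .config/kanata/scripts/kanata_sync_interfaces.py | convert_backtick_to_macro
-- ===== SOURCE A (Python) =====
-- SHIFT_MAP = {
--     "!": "S-1",
--     "@": "S-2",
--     "#": "S-3",
--     "$": "S-4",
--     "%": "S-5",
--     "^": "S-6",
--     "&": "S-7",
--     "*": "S-8",
--     "(": "S-9",
--     ")": "S-0",
--     "_": "S--",
--     "+": "S-=",
--     "{": "S-[",
--     "}": "S-]",
--     "|": "S-\\",
--     ":": "S-;",
--     '"': "S-'",
--     "<": "S-,",
--     ">": "S-.",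
--     "?": "S-/",
--     "~": "S-grv",
-- }
--
-- def convert_backtick_to_macro(backtick_content: str) -> str:
--     """Convert backtick string to kanata macro syntax.
--
--     Processes a string enclosed in backticks and converts it to kanata's
--     macro format with proper key codes.
--
--     Rules:
--       - Uppercase letters → S-<lowercase> (e.g., "A" → "S-a")
--       - Shifted symbols → S-<base_key> (e.g., ":" → "S-;")
--       - Spaces → spc
--       - Special keywords in curly braces → keyword (e.g., "{ent}" → "ent")
--       - Lowercase letters and non-shifted symbols → as-is
--
--     Args:
--         backtick_content: String content from within backticks.
--
--     Returns:
--         Space-separated string of kanata macro key codes.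
--
--     Examples:
--         >>> convert_backtick_to_macro(":w FILE{ent}")
--         'S-; w spc S-f S-i S-l S-e ent'
--         >>> convert_backtick_to_macro("hello world")
--         'h e l l o spc w o r l d'
--     """
--     result = []
--     i = 0
--     while i < len(backtick_content):
--         char = backtick_content[i]
--
--         # Handle special keywords in curly braces like {ent}, {tab}, {bspc}
--         if char == "{":
--             j = backtick_content.find("}", i)
--             if j != -1:
--                 keyword = backtick_content[i + 1 : j]
--                 result.append(keyword)
--                 i = j + 1
--                 continue
--
--         # Handle space
--         if char == " ":
--             result.append("spc")
--         # Handle uppercase letters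
--         elif char.isupper():
--             result.append(f"S-{char.lower()}")
--         # Handle shifted symbols
--         elif char in SHIFT_MAP:
--             result.append(SHIFT_MAP[char])
--         # Handle lowercase letters and non-shifted symbols
--         elif char.islower() or char in "-=[];',.`/\\":
--             # Map backtick to grv
--             if char == "`":
--                 result.append("grv")
--             else:
--                 result.append(char)
--         else:
--             # For any other character, keep as-is (fallback)
--             result.append(char)
--
--         i += 1
--
--     return " ".join(result)
-- ===== SOURCE B (Python) =====
-- # Tokenize-then-map re-implementation: split the input into brace-group /
-- # single-char tokens first, then map each token through one precomputed
-- # dict (char -> key code) instead of A's stateful index scan with a branch chain.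
--
-- _CHAR_MAP = {
--     " ": "spc",
--     "`": "grv",
--     "!": "S-1",
--     "@": "S-2",
--     "#": "S-3",
--     "$": "S-4",
--     "%": "S-5",
--     "^": "S-6",
--     "&": "S-7",
--     "*": "S-8",
--     "(": "S-9",
--     ")": "S-0",
--     "_": "S--",
--     "+": "S-=",
--     "{": "S-[",
--     "}": "S-]",
--     "|": "S-\\",
--     ":": "S-;",
--     '"': "S-'",
--     "<": "S-,",
--     ">": "S-.",
--     "?": "S-/",
--     "~": "S-grv",
--     "A": "S-a", "B": "S-b", "C": "S-c", "D": "S-d", "E": "S-e", "F": "S-f",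
--     "G": "S-g", "H": "S-h", "I": "S-i", "J": "S-j", "K": "S-k", "L": "S-l",
--     "M": "S-m", "N": "S-n", "O": "S-o", "P": "S-p", "Q": "S-q", "R": "S-r",
--     "S": "S-s", "T": "S-t", "U": "S-u", "V": "S-v", "W": "S-w", "X": "S-x",
--     "Y": "S-y", "Z": "S-z",
-- }
--
--
-- def _tokenize(s):
--     """Split into tokens: complete '{...}' groups, else single characters."""
--     tokens = []
--     rest = s
--     while rest:
--         if rest[0] == "{" and "}" in rest:
--             body, _, rest = rest[1:].partition("}")
--             tokens.append("{" + body + "}")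
--         else:
--             tokens.append(rest[0])
--             rest = rest[1:]
--     return tokens
--
--
-- def convert_backtick_to_macro(backtick_content: str) -> str:
--     return " ".join(
--         t[1:-1] if len(t) >= 2 and t[0] == "{" and t[-1] == "}"
--         else _CHAR_MAP.get(t, t)
--         for t in _tokenize(backtick_content)
--     )
-- ===== Notes on version B (the rewrite author's own statement) =====
-- stated objective: alternative
-- what changed: B first splits the input into tokens (complete '{...}' groups or single characters) and then maps each token through one precomputed char->code dictionary, replacing A's stateful index-advancing scan with its five-way branch chain per character.
import Mathlib
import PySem

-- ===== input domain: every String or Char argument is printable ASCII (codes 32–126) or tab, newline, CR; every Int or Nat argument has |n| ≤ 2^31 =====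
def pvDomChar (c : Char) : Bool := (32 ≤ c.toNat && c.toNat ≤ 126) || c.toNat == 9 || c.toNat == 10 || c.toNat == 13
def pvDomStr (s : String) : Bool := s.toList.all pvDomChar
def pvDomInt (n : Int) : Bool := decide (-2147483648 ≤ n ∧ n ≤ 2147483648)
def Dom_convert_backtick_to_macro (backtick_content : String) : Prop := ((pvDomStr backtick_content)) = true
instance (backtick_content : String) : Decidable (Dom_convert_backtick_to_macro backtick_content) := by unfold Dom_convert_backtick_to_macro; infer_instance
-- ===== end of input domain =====

-- B replaces A's stateful index-advancing scan by tokenize-then-map over one precomputed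
-- char->code dictionary (objective: alternative decomposition, same cost).

-- ===== PORT A =====
-- module constant SHIFT_MAP (values kept as List Char: the pieces are joined on the Chars side)
def SHIFT_MAP : PySem.Dict Char (List Char) := ⟨[
  ('!', ['S','-','1']), ('@', ['S','-','2']), ('#', ['S','-','3']), ('$', ['S','-','4']),
  ('%', ['S','-','5']), ('^', ['S','-','6']), ('&', ['S','-','7']), ('*', ['S','-','8']),
  ('(', ['S','-','9']), (')', ['S','-','0']), ('_', ['S','-','-']), ('+', ['S','-','=']),
  ('{', ['S','-','[']), ('}', ['S','-',']']), ('|', ['S','-','\\']), (':', ['S','-',';']),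
  ('"', ['S','-','\'']), ('<', ['S','-',',']), ('>', ['S','-','.']), ('?', ['S','-','/']),
  ('~', ['S','-','g','r','v'])]⟩

-- the body of A's while loop below the brace case (space / isupper / SHIFT_MAP / islower-or-special / fallback)
def charA (c : Char) : List Char :=
  if c == ' ' then ['s','p','c']
  else if PySem.Chars.isupper c then ['S','-', PySem.Chars.lowerChar c]
  else match PySem.Dict.get? SHIFT_MAP c with
  | some v => v
  | none =>
    if PySem.Chars.islower c || ['-','=','[',']',';','\'',',','.','`','/','\\'].contains c then
      if c == '`' then ['g','r','v'] else [c]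
    else [c]

-- A's while loop over index i, as recursion on the remaining suffix; find('}', i) on the
-- remainder (s[i] = '{' ≠ '}', so searching the tail is exact) = takeWhile/dropWhile at the first '}'
def convA : List Char → List (List Char)
  | [] => []
  | c :: rest =>
    if c == '{' && rest.contains '}' then
      rest.takeWhile (· != '}') :: convA ((rest.dropWhile (· != '}')).tail)
    else charA c :: convA rest
termination_by l => l.length
decreasing_by
  · have h1 := List.length_dropWhile_le (· != '}') rest
    simp [List.length_tail]; omega
  · simp

def convert_backtick_to_macro (backtick_content : String) : String :=
  String.ofList (PySem.Chars.join [' '] (convA backtick_content.toList))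

-- ===== PORT B =====
-- Source B's _CHAR_MAP, keys = the 1-character token strings (as List Char)
def CHAR_MAP : PySem.Dict (List Char) (List Char) := ⟨[
  ([' '], ['s','p','c']), (['`'], ['g','r','v']),
  (['!'], ['S','-','1']), (['@'], ['S','-','2']), (['#'], ['S','-','3']), (['$'], ['S','-','4']),
  (['%'], ['S','-','5']), (['^'], ['S','-','6']), (['&'], ['S','-','7']), (['*'], ['S','-','8']),
  (['('], ['S','-','9']), ([')'], ['S','-','0']), (['_'], ['S','-','-']), (['+'], ['S','-','=']),
  (['{'], ['S','-','[']), (['}'], ['S','-',']']), (['|'], ['S','-','\\']), ([':'], ['S','-',';']),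
  (['"'], ['S','-','\'']), (['<'], ['S','-',',']), (['>'], ['S','-','.']), (['?'], ['S','-','/']),
  (['~'], ['S','-','g','r','v']),
  (['A'], ['S','-','a']), (['B'], ['S','-','b']), (['C'], ['S','-','c']), (['D'], ['S','-','d']),
  (['E'], ['S','-','e']), (['F'], ['S','-','f']), (['G'], ['S','-','g']), (['H'], ['S','-','h']),
  (['I'], ['S','-','i']), (['J'], ['S','-','j']), (['K'], ['S','-','k']), (['L'], ['S','-','l']),
  (['M'], ['S','-','m']), (['N'], ['S','-','n']), (['O'], ['S','-','o']), (['P'], ['S','-','p']),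
  (['Q'], ['S','-','q']), (['R'], ['S','-','r']), (['S'], ['S','-','s']), (['T'], ['S','-','t']),
  (['U'], ['S','-','u']), (['V'], ['S','-','v']), (['W'], ['S','-','w']), (['X'], ['S','-','x']),
  (['Y'], ['S','-','y']), (['Z'], ['S','-','z'])]⟩

-- Source B's _tokenize: '"}" in rest' with rest = c :: tail and c = '{' is tail.contains '}';
-- rest[1:].partition("}") = takeWhile/dropWhile at the first '}'
def tokenizeB : List Char → List (List Char)
  | [] => []
  | c :: rest =>
    if c == '{' && rest.contains '}' then
      ('{' :: rest.takeWhile (· != '}') ++ ['}']) :: tokenizeB ((rest.dropWhile (· != '}')).tail)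
    else [c] :: tokenizeB rest
termination_by l => l.length
decreasing_by
  · have h1 := List.length_dropWhile_le (· != '}') rest
    simp [List.length_tail]; omega
  · simp

-- Source B's per-token expression; t[1:-1] on a token with len(t) ≥ 2 is drop 1 then dropLast
def mapTokB (t : List Char) : List Char :=
  if 2 ≤ t.length ∧ t.head? = some '{' ∧ t.getLast? = some '}' then (t.drop 1).dropLast
  else PySem.Dict.getD CHAR_MAP t t

def convert_backtick_to_macro_alt (backtick_content : String) : String :=
  String.ofList (PySem.Chars.join [' '] ((tokenizeB backtick_content.toList).map mapTokB))

-- ===== PRECONDITION & SPEC =====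
def Spec_convert_backtick_to_macro (backtick_content : String) (out : String) : Prop := out = convert_backtick_to_macro_alt backtick_content
instance (backtick_content : String) (out : String) : Decidable (Spec_convert_backtick_to_macro backtick_content out) := by unfold Spec_convert_backtick_to_macro; infer_instance

-- ===== CLAIM (what is proved, stated in full; the proofs are below) =====
def Claim_equal_convert_backtick_to_macro : Prop := ∀ (backtick_content : String), Dom_convert_backtick_to_macro backtick_content → Spec_convert_backtick_to_macro backtick_content (convert_backtick_to_macro backtick_content)

-- ===== LEMMAS AND PROOFS =====

-- the keys of CHAR_MAP, as characters
def pvKeys : List Char :=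
  [' ','`','!','@','#','$','%','^','&','*','(',')','_','+','{','}','|',':','"','<','>','?','~',
   'A','B','C','D','E','F','G','H','I','J','K','L','M','N','O','P','Q','R','S','T','U','V','W','X','Y','Z']

lemma isupper_mem_pvKeys (c : Char) (h : PySem.Chars.isupper c = true) : c ∈ pvKeys := by
  simp [PySem.Chars.isupper, Char.le_def] at h
  obtain ⟨h1, h2⟩ := h
  have hc : c = Char.ofNat c.toNat := (Char.ofNat_toNat c).symm
  have hl : 65 ≤ c.toNat := by exact_mod_cast h1
  have hr : c.toNat ≤ 90 := by exact_mod_cast h2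
  interval_cases h : c.toNat <;> rw [hc] <;> decide

lemma charA_eq_mapTokB (c : Char) : charA c = mapTokB [c] := by
  by_cases hc : c ∈ pvKeys
  · fin_cases hc <;> rfl
  · have hup : PySem.Chars.isupper c = false := by
      cases h : PySem.Chars.isupper c
      · rfl
      · exact absurd (isupper_mem_pvKeys c h) hc
    simp only [pvKeys, List.mem_cons, not_or] at hc
    obtain ⟨h1, h2, h3, h4, h5, h6, h7, h8, h9, h10, h11, h12, h13, h14, h15, h16, h17, h18, h19, h20, h21, h22, h23, h24, h25, h26, h27, h28, h29, h30, h31, h32, h33, h34, h35, h36, h37, h38, h39, h40, h41, h42, h43, h44, h45, h46, h47, h48, h49, -⟩ := hc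
    simp [charA, mapTokB, SHIFT_MAP, CHAR_MAP, PySem.Dict.get?, PySem.Dict.getD, List.find?, hup,
      beq_eq_false_iff_ne.mpr h1, beq_eq_false_iff_ne.mpr h2, beq_eq_false_iff_ne.mpr (Ne.symm h1), beq_eq_false_iff_ne.mpr (Ne.symm h2), beq_eq_false_iff_ne.mpr (Ne.symm h3), beq_eq_false_iff_ne.mpr (Ne.symm h4), beq_eq_false_iff_ne.mpr (Ne.symm h5), beq_eq_false_iff_ne.mpr (Ne.symm h6), beq_eq_false_iff_ne.mpr (Ne.symm h7), beq_eq_false_iff_ne.mpr (Ne.symm h8), beq_eq_false_iff_ne.mpr (Ne.symm h9), beq_eq_false_iff_ne.mpr (Ne.symm h10), beq_eq_false_iff_ne.mpr (Ne.symm h11), beq_eq_false_iff_ne.mpr (Ne.symm h12), beq_eq_false_iff_ne.mpr (Ne.symm h13), beq_eq_false_iff_ne.mpr (Ne.symm h14), beq_eq_false_iff_ne.mpr (Ne.symm h15), beq_eq_false_iff_ne.mpr (Ne.symm h16), beq_eq_false_iff_ne.mpr (Ne.symm h17), beq_eq_false_iff_ne.mpr (Ne.symm h18), beq_eq_false_iff_ne.mpr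 (Ne.symm h19), beq_eq_false_iff_ne.mpr (Ne.symm h20), beq_eq_false_iff_ne.mpr (Ne.symm h21), beq_eq_false_iff_ne.mpr (Ne.symm h22), beq_eq_false_iff_ne.mpr (Ne.symm h23), beq_eq_false_iff_ne.mpr (Ne.symm h24), beq_eq_false_iff_ne.mpr (Ne.symm h25), beq_eq_false_iff_ne.mpr (Ne.symm h26), beq_eq_false_iff_ne.mpr (Ne.symm h27), beq_eq_false_iff_ne.mpr (Ne.symm h28), beq_eq_false_iff_ne.mpr (Ne.symm h29), beq_eq_false_iff_ne.mpr (Ne.symm h30), beq_eq_false_iff_ne.mpr (Ne.symm h31), beq_eq_false_iff_ne.mpr (Ne.symm h32), beq_eq_false_iff_ne.mpr (Ne.symm h33), beq_eq_false_iff_ne.mpr (Ne.symm h34), beq_eq_false_iff_ne.mpr (Ne.symm h35), beq_eq_false_iff_ne.mpr (Ne.symm h36), beq_eq_false_iff_ne.mpr (Ne.symm h37), beq_eq_false_iff_ne.mpr (Ne.symm h38), beq_eq_false_iff_ne.mpr (Ne.symm h39), beq_eq_false_iff_ne.mpr (Ne.symm h40), beq_eq_false_iff_ne.mpr (Ne.symm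 h41), beq_eq_false_iff_ne.mpr (Ne.symm h42), beq_eq_false_iff_ne.mpr (Ne.symm h43), beq_eq_false_iff_ne.mpr (Ne.symm h44), beq_eq_false_iff_ne.mpr (Ne.symm h45), beq_eq_false_iff_ne.mpr (Ne.symm h46), beq_eq_false_iff_ne.mpr (Ne.symm h47), beq_eq_false_iff_ne.mpr (Ne.symm h48), beq_eq_false_iff_ne.mpr (Ne.symm h49), ite_self]

lemma convA_eq_tokenize (l : List Char) : convA l = (tokenizeB l).map mapTokB := by
  induction l using convA.induct with
  | case1 => simp [convA, tokenizeB]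
  | case2 c rest h ih =>
    rw [convA, tokenizeB, if_pos h, if_pos h]
    simp only [List.map_cons]
    rw [ih]
    congr 1
    have hshape : 2 ≤ ('{' :: rest.takeWhile (· != '}') ++ ['}']).length ∧
        ('{' :: rest.takeWhile (· != '}') ++ ['}']).head? = some '{' ∧
        ('{' :: rest.takeWhile (· != '}') ++ ['}']).getLast? = some '}' := by
      refine ⟨by simp, by simp, ?_⟩
      rw [show ('{' :: rest.takeWhile (· != '}') ++ ['}']) = ('{' :: rest.takeWhile (· != '}')) ++ ['}'] by simp]
      exact List.getLast?_concat
    rw [mapTokB, if_pos hshape]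
    rw [show ('{' :: rest.takeWhile (· != '}') ++ ['}']).drop 1 = rest.takeWhile (· != '}') ++ ['}'] by simp]
    exact List.dropLast_concat.symm
  | case3 c rest h ih =>
    rw [convA, tokenizeB, if_neg h, if_neg h]
    simp only [List.map_cons]
    rw [ih, charA_eq_mapTokB]

-- ===== VERDICT (by name: the statement is the Claim_ definition above) =====
theorem convert_backtick_to_macro_spec : Claim_equal_convert_backtick_to_macro := by
  intro s _
  unfold Spec_convert_backtick_to_macro convert_backtick_to_macro convert_backtick_to_macro_alt
  rw [convA_eq_tokenize]
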